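-- pv_equiv track=rewrite | github.com/liltmagicbox/3dkatsu | objects/assetobject/material.py | set_namedict
-- ===== SOURCE A (Python) =====
-- def set_namedict(namedict, name,item):
-- 	if name in namedict:
-- 		baridx = name.rfind('_')
-- 		if baridx == -1:
-- 			name = name+'_0'
-- 			name,namedict = set_namedict(namedict,name,item)
-- 		else:
-- 			front = name[:baridx]
-- 			back = name[baridx+1:]
-- 			if back.isdecimal():#digit 3^3, numeric 3.3E06
-- 				i = int(back)+1
-- 				name = f"{front}_{i}"
-- 				name,namedict = set_namedict(namedict,name,item)
-- 			else:
-- 				name = name+'_0'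
-- 				name,namedict = set_namedict(namedict,name,item)
-- 	namedict[name] = item
-- 	return name, namedict
-- ===== SOURCE B (Python) =====
-- def set_namedict(namedict, name, item):
--     # Iterative probe: advance the candidate name while it collides, then insert once.
--     while name in namedict:
--         baridx = name.rfind('_')
--         back = name[baridx+1:]
--         if baridx != -1 and back.isdecimal():
--             name = f"{name[:baridx]}_{int(back)+1}"
--         else:
--             name = name + '_0'
--     namedict[name] = item
--     return name, namedict
-- ===== Notes on version B (the rewrite author's own statement) =====
-- stated objective: simpler
-- what changed: Replaced A's tail recursion (which re-assigns namedict[name]=item at every unwinding level) by a single while-loop that probes for the first free name and performs exactly one dict assignment, with the two identical '_0' branches merged into one else.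
import Mathlib
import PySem

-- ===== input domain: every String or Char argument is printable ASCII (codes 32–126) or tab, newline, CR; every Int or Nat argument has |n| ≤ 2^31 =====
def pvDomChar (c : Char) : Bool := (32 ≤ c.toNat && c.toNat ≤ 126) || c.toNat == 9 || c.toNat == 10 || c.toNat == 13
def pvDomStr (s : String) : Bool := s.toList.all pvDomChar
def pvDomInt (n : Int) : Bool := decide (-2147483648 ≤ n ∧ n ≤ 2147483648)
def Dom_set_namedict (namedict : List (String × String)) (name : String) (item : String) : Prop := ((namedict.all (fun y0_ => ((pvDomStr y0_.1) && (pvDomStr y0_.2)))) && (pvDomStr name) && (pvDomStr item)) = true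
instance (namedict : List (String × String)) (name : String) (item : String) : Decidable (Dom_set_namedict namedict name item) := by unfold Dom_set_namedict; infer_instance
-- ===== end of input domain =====

-- B merges A's two identical '_0' branches, replaces the recursion by an iterative probe and
-- performs one dict assignment instead of one per recursion level (simpler; both Pythons leave
-- namedict in the same mutated state, so the in-place effect also agrees).
-- ===== PORT A =====
-- Fuel guard only (makes the same computation total): the probe visits pairwise-distinct keys of
-- the unchanged dict, so namedict.length + 1 steps always suffice; the fuel-0 branch is unreachable.
def setGoA (fuel : Nat) (namedict : PySem.Dict String String) (name : String) (item : String) :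
    String × PySem.Dict String String :=
  match fuel with
  | 0 => (name, namedict.insert name item)
  | f+1 =>
    if namedict.contains name then
      let baridx := PySem.Str.rfind name "_"
      if baridx == -1 then
        let name := name ++ "_0"
        let r := setGoA f namedict name item
        (r.1, r.2.insert r.1 item)
      else
        let front := PySem.Str.slice name none (some baridx)
        let back := PySem.Str.slice name (some (baridx + 1)) none
        -- back.isdecimal(): on the printable-ASCII domain isdecimal coincides with isdigit
        if PySem.Str.strIsdigit back then
          let i := (PySem.Int.ofStr? back).getD 0 + 1   -- int(back): the isdigit guard means ofStr? = some here
          let name := front ++ "_" ++ PySem.Int.toStr i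
          let r := setGoA f namedict name item
          (r.1, r.2.insert r.1 item)
        else
          let name := name ++ "_0"
          let r := setGoA f namedict name item
          (r.1, r.2.insert r.1 item)
    else (name, namedict.insert name item)

def set_namedict (namedict : List (String × String)) (name : String) (item : String) : String × (List (String × String)) :=
  let d : PySem.Dict String String := PySem.Dict.mk namedict
  let r := setGoA (namedict.length + 1) d name item
  (r.1, r.2.items)

-- ===== PORT B =====
def nextNameB (name : String) : String :=
  let baridx := PySem.Str.rfind name "_"
  let back := PySem.Str.slice name (some (baridx + 1)) none
  if baridx != -1 && PySem.Str.strIsdigit back then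
    PySem.Str.slice name none (some baridx) ++ "_" ++ PySem.Int.toStr ((PySem.Int.ofStr? back).getD 0 + 1)
  else name ++ "_0"

-- iterative 'while name in namedict' loop; same fuel guard as the A-side port
def probeB (fuel : Nat) (d : PySem.Dict String String) (name : String) : String :=
  match fuel with
  | 0 => name
  | f+1 => if d.contains name then probeB f d (nextNameB name) else name

def set_namedict_alt (namedict : List (String × String)) (name : String) (item : String) : String × (List (String × String)) :=
  let d : PySem.Dict String String := PySem.Dict.mk namedict
  let n := probeB (namedict.length + 1) d name
  (n, (d.insert n item).items)

-- ===== PRECONDITION & SPEC =====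
def Spec_set_namedict (namedict : List (String × String)) (name : String) (item : String) (out : String × (List (String × String))) : Prop := out = set_namedict_alt namedict name item
instance (namedict : List (String × String)) (name : String) (item : String) (out : String × (List (String × String))) : Decidable (Spec_set_namedict namedict name item out) := by unfold Spec_set_namedict; infer_instance

-- ===== CLAIM (what is proved, stated in full; the proofs are below) =====
def Claim_equal_set_namedict : Prop := ∀ (namedict : List (String × String)) (name : String) (item : String), Dom_set_namedict namedict name item → Spec_set_namedict namedict name item (set_namedict namedict name item)

-- ===== LEMMAS AND PROOFS =====
-- A's recursion returns B's probed name, and the repeated re-assignment on unwinding collapses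
-- to the single insert (PySem.Dict.insert_insert_self).
theorem setGoA_eq_probeB (fuel : Nat) (d : PySem.Dict String String) (name item : String) :
    setGoA fuel d name item = (probeB fuel d name, d.insert (probeB fuel d name) item) := by
  induction fuel generalizing name with
  | zero => rfl
  | succ f ih =>
    by_cases hc : d.contains name
    · by_cases hb : PySem.Chars.rfind name.toList ['_'] = -1
      · simp [setGoA, probeB, nextNameB, hc, hb, ih, PySem.Dict.insert_insert_self]
      · by_cases hd : PySem.Chars.strIsdigit
            (PySem.List.slice name.toList (some (PySem.Chars.rfind name.toList ['_'] + 1)) none) = true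
        · simp [setGoA, probeB, nextNameB, hc, hb, hd, ih, PySem.Dict.insert_insert_self]
        · simp [setGoA, probeB, nextNameB, hc, hb, hd, ih, PySem.Dict.insert_insert_self]
    · simp [setGoA, probeB, hc]

-- ===== VERDICT (by name: the statement is the Claim_ definition above) =====
theorem set_namedict_spec : Claim_equal_set_namedict := by
  intro namedict name item _
  unfold Spec_set_namedict set_namedict set_namedict_alt
  simp only [setGoA_eq_probeB]
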